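-- pv_equiv track=rewrite | github.com/awilliambauer/practicum | include/source/for_loop/for_loop_7.py | for_loop_investigation
-- ===== SOURCE A (Python) =====
-- def for_loop_investigation(lst):
-- 	a = 5
-- 	for n in lst:
-- 		a = a - 3
-- 		if n < 0:
-- 			a = a + 3
-- 		if -1 < n and n < 1:
-- 			return(a)
-- 	return (a)
-- ===== SOURCE B (Python) =====
-- def for_loop_investigation(lst):
--     # locate the stop boundary, then compute the answer in closed form
--     try:
--         stop = lst.index(0)
--     except ValueError:
--         stop = len(lst) - 1
--     prefix = lst[:stop + 1]
--     return 5 - 3 * sum(1 for x in prefix if x >= 0)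
-- ===== Notes on version B (the rewrite author's own statement) =====
-- stated objective: alternative
-- what changed: Replaces the accumulator-with-early-return scan by locating the first zero element, slicing the prefix up to and including it, and computing 5 - 3*(count of nonnegative elements in that prefix) in closed form.
import Mathlib
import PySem

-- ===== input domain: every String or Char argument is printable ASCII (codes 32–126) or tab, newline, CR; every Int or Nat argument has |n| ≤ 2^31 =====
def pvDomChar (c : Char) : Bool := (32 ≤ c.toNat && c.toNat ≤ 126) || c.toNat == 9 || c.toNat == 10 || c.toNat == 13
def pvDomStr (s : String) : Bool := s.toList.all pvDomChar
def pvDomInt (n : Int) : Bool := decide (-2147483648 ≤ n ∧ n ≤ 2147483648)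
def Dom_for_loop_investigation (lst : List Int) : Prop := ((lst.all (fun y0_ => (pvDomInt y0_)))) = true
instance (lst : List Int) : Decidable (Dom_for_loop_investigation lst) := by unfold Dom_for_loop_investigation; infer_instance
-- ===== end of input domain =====

-- B replaces A's accumulator-with-early-return scan by locating the first zero, slicing the
-- prefix up to and including it, and a closed-form count (alternative decomposition, same O(n) cost).

-- ===== PORT A =====
def forLoopInvestigationGo (a : Int) : List Int → Int
  | [] => a
  | n :: rest =>
    let a1 := a - 3
    let a2 := if n < 0 then a1 + 3 else a1
    if -1 < n ∧ n < 1 then a2 else forLoopInvestigationGo a2 rest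

def for_loop_investigation (lst : List Int) : Int :=
  forLoopInvestigationGo 5 lst

-- ===== PORT B =====
def for_loop_investigation_alt (lst : List Int) : Int :=
  let stop : Int :=
    match PySem.List.index? lst 0 with
    | some i => (i : Int)
    | none => (lst.length : Int) - 1
  let pfx := PySem.List.slice lst none (some (stop + 1))
  5 - 3 * ((pfx.countP (fun x => 0 ≤ x)) : Int)

-- ===== PRECONDITION & SPEC =====
def Spec_for_loop_investigation (lst : List Int) (out : Int) : Prop := out = for_loop_investigation_alt lst
instance (lst : List Int) (out : Int) : Decidable (Spec_for_loop_investigation lst out) := by unfold Spec_for_loop_investigation; infer_instance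

-- ===== CLAIM (what is proved, stated in full; the proofs are below) =====
def Claim_equal_for_loop_investigation : Prop := ∀ (lst : List Int), Dom_for_loop_investigation lst → Spec_for_loop_investigation lst (for_loop_investigation lst)

-- ===== LEMMAS AND PROOFS =====

lemma alt_nil : for_loop_investigation_alt [] = 5 := by decide

lemma alt_cons_zero (rest : List Int) :
    for_loop_investigation_alt (0 :: rest) = 2 := by
  simp only [for_loop_investigation_alt]
  rw [PySem.List.index?_cons_self]
  have : ((0:Nat):Int) + 1 = ((1:Nat):Int) := by norm_num
  simp only [this, PySem.List.slice_to_natCast]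
  simp

lemma alt_cons_ne (n : Int) (rest : List Int) (hn : n ≠ 0) :
    for_loop_investigation_alt (n :: rest) =
      for_loop_investigation_alt rest - (if 0 ≤ n then 3 else 0) := by
  simp only [for_loop_investigation_alt]
  rw [PySem.List.index?_cons_of_ne _ hn]
  cases h : PySem.List.index? rest 0 with
  | some i =>
      simp only [Option.map_some]
      have e1 : ((i+1:Nat):Int) + 1 = ((i+2:Nat):Int) := by push_cast; ring
      have e2 : ((i:Nat):Int) + 1 = ((i+1:Nat):Int) := by push_cast; ring
      simp only [e1, e2, PySem.List.slice_to_natCast, List.take_succ_cons, List.countP_cons]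
      by_cases h0 : (0:Int) ≤ n <;> · simp [h0]; try ring
  | none =>
      simp only [Option.map_none]
      have e1 : ((((n::rest).length:Nat)):Int) - 1 + 1 = (((rest.length + 1 :Nat)):Int) := by
        push_cast [List.length_cons]; ring
      have e2 : ((rest.length:Nat):Int) - 1 + 1 = ((rest.length:Nat):Int) := by ring
      simp only [e1, e2, PySem.List.slice_to_natCast, List.take_succ_cons, List.take_length,
        List.countP_cons]
      by_cases h0 : (0:Int) ≤ n <;> · simp [h0]; try ring

lemma go_eq (lst : List Int) : ∀ a : Int,
    forLoopInvestigationGo a lst = a - 5 + for_loop_investigation_alt lst := by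
  induction lst with
  | nil => intro a; simp [forLoopInvestigationGo, alt_nil]
  | cons n rest ih =>
    intro a
    by_cases hn : n = 0
    · subst hn
      simp [forLoopInvestigationGo, alt_cons_zero]
      omega
    · have hb : ¬ (-1 < n ∧ n < 1) := by omega
      simp only [forLoopInvestigationGo, hb, if_false]
      rw [ih, alt_cons_ne n rest hn]
      by_cases h0 : n < 0 <;> simp [h0] <;> omega

-- ===== VERDICT (by name: the statement is the Claim_ definition above) =====
theorem for_loop_investigation_spec : Claim_equal_for_loop_investigation := by
  intro lst _
  unfold Spec_for_loop_investigation for_loop_investigation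
  rw [go_eq]
  omega
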